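-- pv_equiv track=rewrite | github.com/MaxFerAlten/tenderwriter | backend/app/ingestion/pipeline.py | _structure_elements
-- ===== SOURCE A (Python) =====
-- def _structure_elements(elements: list[dict]) -> tuple[str, dict[str, str]]:
--     """
--     Build a structured full text and section map from parsed elements.
--
--     Returns:
--         Tuple of (full_text, section_texts_dict)
--     """
--     full_parts: list[str] = []
--     sections: dict[str, str] = {}
--     current_section = "Introduction"
--     current_section_parts: list[str] = []
--
--     for elem in elements:
--         text = elem.get("text", "")
--         elem_type = elem.get("type", "Text")
--
--         if elem_type in ("Title", "Header") and text:
--             # Save previous section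
--             if current_section_parts:
--                 sections[current_section] = "\n".join(current_section_parts)
--             current_section = text
--             current_section_parts = []
--
--         if text:
--             full_parts.append(text)
--             current_section_parts.append(text)
--
--     # Save last section
--     if current_section_parts:
--         sections[current_section] = "\n".join(current_section_parts)
--
--     full_text = "\n\n".join(full_parts)
--     return full_text, sections
-- ===== SOURCE B (Python) =====
-- def _structure_elements(elements: list[dict]) -> tuple[str, dict[str, str]]:
--     # Recursive decomposition: reduce each element to a (text, type) item,
--     # then recursively split the item list at heading boundaries with a
--     # span (takewhile/dropwhile) step, producing the (name, body) pairs.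
--     items = [(e.get("text", ""), e.get("type", "Text")) for e in elements]
--
--     def is_bound(item):
--         return item[1] in ("Title", "Header") and bool(item[0])
--
--     def build(name, lead, rest):
--         k = 0
--         while k < len(rest) and not is_bound(rest[k]):
--             k += 1
--         parts = lead + [t for t, _ in rest[:k] if t]
--         pairs = [(name, "\n".join(parts))] if parts else []
--         if k < len(rest):
--             head = rest[k][0]
--             pairs += build(head, [head], rest[k + 1:])
--         return pairs
--
--     sections: dict[str, str] = {}
--     for n, s in build("Introduction", [], items):
--         sections[n] = s
--     full_text = "\n\n".join(t for t, _ in items if t)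
--     return full_text, sections
-- ===== Notes on version B (the rewrite author's own statement) =====
-- stated objective: alternative
-- what changed: Replaces A's single left-to-right loop with carried section registers and save-on-boundary dict writes by a recursive divide at heading boundaries: elements are first projected to (text,type) items, then a recursive span/slice function splits the item list at each heading and emits the (name, body) pairs, consumed afterwards to fill the dict; full_text is computed by an independent filter-join over the items.
import Mathlib
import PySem

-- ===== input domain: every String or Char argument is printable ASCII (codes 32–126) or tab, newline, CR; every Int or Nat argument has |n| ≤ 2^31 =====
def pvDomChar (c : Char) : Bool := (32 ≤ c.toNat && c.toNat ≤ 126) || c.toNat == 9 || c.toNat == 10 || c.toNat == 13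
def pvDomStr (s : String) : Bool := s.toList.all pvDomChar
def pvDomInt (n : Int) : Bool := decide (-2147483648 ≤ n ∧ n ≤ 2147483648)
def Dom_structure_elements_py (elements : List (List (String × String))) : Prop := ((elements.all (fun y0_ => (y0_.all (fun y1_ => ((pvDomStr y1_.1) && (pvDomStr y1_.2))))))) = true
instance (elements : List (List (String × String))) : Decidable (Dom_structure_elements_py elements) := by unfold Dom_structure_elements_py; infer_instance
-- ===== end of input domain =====

-- B replaces A's carried-state save-on-boundary loop by a recursive split of the
-- (text, type) item list at heading boundaries (alternative decomposition, same cost).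

-- elem.get(k, d): first match in the association list
def pvGet (elem : List (String × String)) (k d : String) : String :=
  (PySem.Dict.mk elem).getD k d

-- ===== PORT A =====
-- loop body of A, carrying (full_parts, sections, current_section, current_section_parts)
def pvStepA (st : List String × PySem.Dict String String × String × List String)
    (elem : List (String × String)) :
    List String × PySem.Dict String String × String × List String :=
  let text := pvGet elem "text" ""
  let ty := pvGet elem "type" "Text"
  let st1 :=
    if (ty = "Title" ∨ ty = "Header") ∧ text ≠ "" then
      (st.1,
       (if st.2.2.2 ≠ [] then st.2.1.insert st.2.2.1 (PySem.Str.join "\n" st.2.2.2) else st.2.1),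
       text, ([] : List String))
    else st
  if text ≠ "" then (st1.1 ++ [text], st1.2.1, st1.2.2.1, st1.2.2.2 ++ [text]) else st1

-- A's code after the loop: save last section, join full_parts
def pvFinalA (st : List String × PySem.Dict String String × String × List String) :
    String × (List (String × String)) :=
  (PySem.Str.join "\n\n" st.1,
   (if st.2.2.2 ≠ [] then st.2.1.insert st.2.2.1 (PySem.Str.join "\n" st.2.2.2) else st.2.1).items)

def structure_elements_py (elements : List (List (String × String))) :
    String × (List (String × String)) :=
  pvFinalA (elements.foldl pvStepA
    (([] : List String), (PySem.Dict.empty : PySem.Dict String String), "Introduction",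
     ([] : List String)))

-- ===== PORT B =====
-- (text, type) item of an element
def pvItem (e : List (String × String)) : String × String :=
  (pvGet e "text" "", pvGet e "type" "Text")

-- is_bound(item)
def pvBoundB (p : String × String) : Bool :=
  (p.2 == "Title" || p.2 == "Header") && p.1 != ""

-- 'if t' filter of a single item's text
def pvPick (p : String × String) : Option String :=
  if p.1 ≠ "" then some p.1 else none

-- the [(name, "\n".join(parts))] if parts else [] expression
def pvEmit (name : String) (parts : List String) : List (String × String) :=
  if parts ≠ [] then [(name, PySem.Str.join "\n" parts)] else []

-- the recursive tail of build: each further segment starts at a boundary item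
def pvRest : List (String × String) → List (String × String)
  | [] => []
  | hd :: tl =>
      pvEmit hd.1 (hd.1 :: (tl.takeWhile (fun p => !pvBoundB p)).filterMap pvPick) ++
        pvRest (tl.dropWhile (fun p => !pvBoundB p))
termination_by l => l.length
decreasing_by
  have := List.length_dropWhile_le (fun p => !pvBoundB p) tl
  simp; omega

-- build(name, lead, rest): span to the next boundary, emit the pair, recurse on the rest
def pvBuild (name : String) (lead : List String) (rest : List (String × String)) :
    List (String × String) :=
  pvEmit name (lead ++ (rest.takeWhile (fun p => !pvBoundB p)).filterMap pvPick) ++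
    pvRest (rest.dropWhile (fun p => !pvBoundB p))

def structure_elements_py_alt (elements : List (List (String × String))) :
    String × (List (String × String)) :=
  let items := elements.map pvItem
  let sections := (pvBuild "Introduction" [] items).foldl
    (fun (d : PySem.Dict String String) p => d.insert p.1 p.2) PySem.Dict.empty
  (PySem.Str.join "\n\n" (items.filterMap pvPick), sections.items)

-- ===== PRECONDITION & SPEC =====
def Spec_structure_elements_py (elements : List (List (String × String))) (out : String × (List (String × String))) : Prop := out = structure_elements_py_alt elements
instance (elements : List (List (String × String))) (out : String × (List (String × String))) : Decidable (Spec_structure_elements_py elements out) := by unfold Spec_structure_elements_py; infer_instance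

-- ===== CLAIM =====
def Claim_equal_structure_elements_py : Prop := ∀ (elements : List (List (String × String))), Dom_structure_elements_py elements → Spec_structure_elements_py elements (structure_elements_py elements)

-- ===== LEMMAS AND PROOFS =====

theorem pvRest_nil : pvRest [] = [] := by rw [pvRest]

theorem pvRest_cons (hd : String × String) (tl : List (String × String)) :
    pvRest (hd :: tl) =
      pvEmit hd.1 (hd.1 :: (tl.takeWhile (fun p => !pvBoundB p)).filterMap pvPick) ++
        pvRest (tl.dropWhile (fun p => !pvBoundB p)) := by
  rw [pvRest]

-- unfolding pvBuild at a boundary head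
theorem pvBuild_cons_bound (name : String) (lead : List String) (x : String × String)
    (l : List (String × String)) (hb : pvBoundB x = true) :
    pvBuild name lead (x :: l) =
      (if lead ≠ [] then [(name, PySem.Str.join "\n" lead)] else []) ++ pvBuild x.1 [x.1] l := by
  simp [pvBuild, hb, pvRest_cons, pvEmit]

-- unfolding pvBuild at a non-boundary head with empty text
theorem pvBuild_cons_skip (name : String) (lead : List String) (x : String × String)
    (l : List (String × String)) (hb : pvBoundB x = false) (ht : x.1 = "") :
    pvBuild name lead (x :: l) = pvBuild name lead l := by
  simp [pvBuild, hb, pvPick, ht]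

-- unfolding pvBuild at a non-boundary head with non-empty text
theorem pvBuild_cons_text (name : String) (lead : List String) (x : String × String)
    (l : List (String × String)) (hb : pvBoundB x = false) (ht : x.1 ≠ "") :
    pvBuild name lead (x :: l) = pvBuild name (lead ++ [x.1]) l := by
  simp [pvBuild, hb, pvPick, ht, List.append_assoc]

-- main invariant: A's folded state finalized = B's recursive split consumed from state
theorem pvA_build (elems : List (List (String × String))) :
    ∀ (fp : List String) (sec : PySem.Dict String String) (cs : String) (cps : List String),
    pvFinalA (elems.foldl pvStepA (fp, sec, cs, cps)) =
      (PySem.Str.join "\n\n" (fp ++ (elems.map pvItem).filterMap pvPick),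
       ((pvBuild cs cps (elems.map pvItem)).foldl
          (fun (d : PySem.Dict String String) p => d.insert p.1 p.2) sec).items) := by
  induction elems with
  | nil =>
    intro fp sec cs cps
    by_cases hc : cps = [] <;>
      simp [pvFinalA, pvBuild, pvEmit, pvRest_nil, hc]
  | cons e rest ih =>
    intro fp sec cs cps
    by_cases hb : pvBoundB (pvItem e) = true
    · have hcond : (pvGet e "type" "Text" = "Title" ∨ pvGet e "type" "Text" = "Header") ∧
          pvGet e "text" "" ≠ "" := by
        simpa [pvBoundB, pvItem] using hb
      have ht : pvGet e "text" "" ≠ "" := hcond.2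
      rw [List.map_cons, pvBuild_cons_bound _ _ _ _ hb]
      simp only [List.foldl_cons, pvStepA, if_pos hcond, if_pos ht, List.foldl_append]
      rw [ih]
      by_cases hc : cps = [] <;>
        simp [pvItem, pvPick, ht, hc, List.append_assoc]
    · have hcond : ¬((pvGet e "type" "Text" = "Title" ∨ pvGet e "type" "Text" = "Header") ∧
          pvGet e "text" "" ≠ "") := by
        intro hcon
        apply hb
        simp [pvBoundB, pvItem]
        tauto
      by_cases ht : pvGet e "text" "" = ""
      · rw [List.map_cons,
          pvBuild_cons_skip _ _ _ _ (by simpa using hb) (by simpa [pvItem] using ht)]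
        simp only [List.foldl_cons, pvStepA, if_neg hcond, if_neg (not_not_intro ht)]
        rw [ih]
        simp only [pvItem, List.filterMap_cons, pvPick, ht]
        simp
      · rw [List.map_cons,
          pvBuild_cons_text _ _ _ _ (by simpa using hb) (by simpa [pvItem] using ht)]
        simp only [List.foldl_cons, pvStepA, if_neg hcond, if_pos ht]
        rw [ih]
        simp [pvItem, pvPick, ht, List.append_assoc]

-- ===== VERDICT =====
theorem structure_elements_py_spec : Claim_equal_structure_elements_py := by
  intro elements _
  unfold Spec_structure_elements_py structure_elements_py structure_elements_py_alt
  simpa using pvA_build elements [] PySem.Dict.empty "Introduction" []
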